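-- pv_equiv track=rewrite | github.com/bonninr/organizer2 | technical_drawing.py | generate_ago_pattern_for_exploded
-- ===== SOURCE A (Python) =====
-- def generate_ago_pattern_for_exploded(number_of_notes):
--     """Generate AGO pattern for exploded view."""
--     octave_pattern = "ststsb stststs b"
--     notes_per_octave = 12
--     complete_octaves = number_of_notes // notes_per_octave
--     remaining_notes = number_of_notes % notes_per_octave
--
--     pattern_parts = []
--     for _ in range(complete_octaves):
--         pattern_parts.append(octave_pattern)
--
--     if remaining_notes > 0:
--         partial_pattern = ""
--         note_count = 0
--         for char in octave_pattern:
--             if char != ' ':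
--                 partial_pattern += char
--                 if char in ['s', 't']:
--                     note_count += 1
--                     if note_count >= remaining_notes:
--                         break
--             elif partial_pattern:
--                 partial_pattern += char
--         pattern_parts.append(partial_pattern.strip())
--
--     return " ".join(pattern_parts)
-- ===== SOURCE B (Python) =====
-- def generate_ago_pattern_for_exploded(number_of_notes):
--     """Generate AGO pattern for exploded view (index-then-slice decomposition)."""
--     octave_pattern = "ststsb stststs b"
--     complete_octaves = number_of_notes // 12
--     remaining = number_of_notes % 12
--     note_positions = [i for i, c in enumerate(octave_pattern) if c in 'st']
--     parts = [octave_pattern] * complete_octaves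
--     if remaining > 0:
--         idx = note_positions[remaining - 1]
--         parts.append(octave_pattern[:idx + 1].strip())
--     return " ".join(parts)
-- ===== Notes on version B (the rewrite author's own statement) =====
-- stated objective: simpler
-- what changed: Replaces A's char-by-char accumulate-and-count state machine (with break and space bookkeeping) by precomputing the note indices once and slicing the pattern at the nth note position; complete octaves become a list-repeat instead of an append loop.
import Mathlib
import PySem

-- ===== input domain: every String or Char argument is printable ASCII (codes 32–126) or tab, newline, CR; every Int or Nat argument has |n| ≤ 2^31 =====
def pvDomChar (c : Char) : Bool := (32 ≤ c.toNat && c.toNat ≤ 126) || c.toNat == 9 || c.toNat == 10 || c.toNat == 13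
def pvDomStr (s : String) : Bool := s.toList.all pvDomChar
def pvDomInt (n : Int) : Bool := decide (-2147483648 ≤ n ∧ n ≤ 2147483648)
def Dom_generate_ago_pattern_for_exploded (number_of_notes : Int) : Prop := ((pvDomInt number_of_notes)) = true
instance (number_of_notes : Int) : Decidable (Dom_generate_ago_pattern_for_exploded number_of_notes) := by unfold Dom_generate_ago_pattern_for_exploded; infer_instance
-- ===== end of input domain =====

-- B replaces A's accumulate-and-count state machine by precomputing note positions and slicing; same cost, simpler decomposition.

-- ===== PORT A =====
-- the inner 'for char in octave_pattern' loop with its break, as structural recursion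
def agoPartialLoop (cs : List Char) (acc : List Char) (note_count remaining : Int) : List Char :=
  match cs with
  | [] => acc
  | c :: rest =>
    if c ≠ ' ' then
      let acc' := acc ++ [c]
      if c = 's' ∨ c = 't' then
        if note_count + 1 ≥ remaining then acc'
        else agoPartialLoop rest acc' (note_count + 1) remaining
      else agoPartialLoop rest acc' note_count remaining
    else if acc ≠ [] then agoPartialLoop rest (acc ++ [c]) note_count remaining
    else agoPartialLoop rest acc note_count remaining

def generate_ago_pattern_for_exploded (number_of_notes : Int) : String :=
  let octave_pattern : String := "ststsb stststs b"
  let complete_octaves := PySem.Int.floordiv number_of_notes 12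
  let remaining_notes := PySem.Int.mod number_of_notes 12
  let pattern_parts : List String :=
    (PySem.List.pyRange 0 complete_octaves 1).foldl (fun acc _ => acc ++ [octave_pattern]) []
  let pattern_parts :=
    if remaining_notes > 0 then
      pattern_parts ++
        [String.ofList (PySem.Chars.strip (agoPartialLoop octave_pattern.toList [] 0 remaining_notes))]
    else pattern_parts
  PySem.Str.join " " pattern_parts

-- ===== PORT B =====
def generate_ago_pattern_for_exploded_alt (number_of_notes : Int) : String :=
  let octave_pattern : String := "ststsb stststs b"
  let complete_octaves := PySem.Int.floordiv number_of_notes 12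
  let remaining := PySem.Int.mod number_of_notes 12
  let note_positions : List Int :=
    (PySem.List.enumerate octave_pattern.toList 0).filterMap
      (fun p => if p.2 = 's' ∨ p.2 = 't' then some p.1 else none)
  let parts : List String := List.replicate complete_octaves.toNat octave_pattern
  let parts :=
    if remaining > 0 then
      let idx := PySem.List.pyGetD note_positions (remaining - 1) 0
      parts ++
        [String.ofList (PySem.Chars.strip
          (PySem.List.slice octave_pattern.toList none (some (idx + 1))))]
    else parts
  PySem.Str.join " " parts

-- ===== PRECONDITION & SPEC =====
def Spec_generate_ago_pattern_for_exploded (number_of_notes : Int) (out : String) : Prop := out = generate_ago_pattern_for_exploded_alt number_of_notes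
instance (number_of_notes : Int) (out : String) : Decidable (Spec_generate_ago_pattern_for_exploded number_of_notes out) := by unfold Spec_generate_ago_pattern_for_exploded; infer_instance

-- ===== CLAIM (what is proved, stated in full; the proofs are below) =====
def Claim_equal_generate_ago_pattern_for_exploded : Prop := ∀ (number_of_notes : Int), Dom_generate_ago_pattern_for_exploded number_of_notes → Spec_generate_ago_pattern_for_exploded number_of_notes (generate_ago_pattern_for_exploded number_of_notes)

-- ===== LEMMAS AND PROOFS =====

-- A's complete-octave loop builds exactly a replicate
theorem foldl_append_const {α β : Type} (p : β) (xs : List α) (init : List β) :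
    xs.foldl (fun acc _ => acc ++ [p]) init = init ++ List.replicate xs.length p := by
  induction xs generalizing init with
  | nil => simp
  | cons x xs ih =>
    rw [List.foldl_cons, ih, List.length_cons]
    simp only [List.append_assoc, List.singleton_append, ← List.replicate_succ, List.replicate_succ']

theorem replicate_parts_eq (c : Int) (p : String) :
    (PySem.List.pyRange 0 c 1).foldl (fun acc _ => acc ++ [p]) [] = List.replicate c.toNat p := by
  rw [foldl_append_const, PySem.List.length_pyRange_one]
  simp

-- the two partial-octave strings agree for each remaining value 1..11
theorem partial_eq (r : Int) (h0 : 0 < r) (h12 : r < 12) :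
    String.ofList (PySem.Chars.strip (agoPartialLoop "ststsb stststs b".toList [] 0 r)) =
    String.ofList (PySem.Chars.strip (PySem.List.slice "ststsb stststs b".toList none
      (some (PySem.List.pyGetD
        ((PySem.List.enumerate "ststsb stststs b".toList 0).filterMap
          (fun p => if p.2 = 's' ∨ p.2 = 't' then some p.1 else none)) (r - 1) 0 + 1)))) := by
  interval_cases r <;> decide

-- ===== VERDICT (by name: the statement is the Claim_ definition above) =====
theorem generate_ago_pattern_for_exploded_spec : Claim_equal_generate_ago_pattern_for_exploded := by
  intro n _
  unfold Spec_generate_ago_pattern_for_exploded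
  unfold generate_ago_pattern_for_exploded generate_ago_pattern_for_exploded_alt
  simp only [replicate_parts_eq]
  have hm : PySem.Int.mod n 12 = n % 12 := PySem.Int.mod_eq_emod_of_pos (by norm_num)
  by_cases h : PySem.Int.mod n 12 > 0
  · have h12 : PySem.Int.mod n 12 < 12 := by rw [hm]; exact Int.emod_lt_of_pos n (by norm_num)
    simp only [if_pos h]
    rw [partial_eq _ h h12]
  · simp only [if_neg h]
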